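-- pv_equiv track=rewrite | github.com/aaaeide/advent-of-code-2020 | d06.py | solve
-- ===== SOURCE A (Python) =====
-- from functools import reduce
-- from typing import Tuple
--
-- def solve(inp: str) -> Tuple[int, int]:
--     groups = [group.lower().strip().split("\n")
--               for group in inp.split("\n\n")]
--
--     any_answered = [reduce(lambda acc, cur: acc.union(cur),
--                            [set(person) for person in group])
--                     for group in groups]
--     everyone_answered = [reduce(lambda acc, cur: acc.intersection(cur),
--                                 [set(person) for person in group])
--                          for group in groups]
--
--     sum_any_answered = reduce(
--         lambda acc_sum, cur_set: acc_sum + len(cur_set), any_answered, 0)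
--     sum_everyone_answered = reduce(
--         lambda acc_sum, cur_set: acc_sum + len(cur_set), everyone_answered, 0)
--
--     return sum_any_answered, sum_everyone_answered
-- ===== SOURCE B (Python) =====
-- def solve(inp):
--     groups = [group.lower().strip().split("\n") for group in inp.split("\n\n")]
--     total_any = 0
--     total_all = 0
--     for group in groups:
--         cnt = {}
--         for person in group:
--             for c in dict.fromkeys(person):
--                 cnt[c] = cnt.get(c, 0) + 1
--         total_any += len(cnt)
--         total_all += sum(1 for v in cnt.values() if v == len(group))
--     return total_any, total_all
-- ===== Notes on version B (the rewrite author's own statement) =====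
-- stated objective: idiomatic
-- what changed: Replaces the two per-group reduce-of-sets passes (a union fold and an intersection fold over freshly built per-person sets) by a single pass per group that builds one character-occurrence counter; the union size is the counter's size and the everyone-answered count is the number of counter entries equal to the group size (one traversal of each group, no intermediate set objects).
import Mathlib
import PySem

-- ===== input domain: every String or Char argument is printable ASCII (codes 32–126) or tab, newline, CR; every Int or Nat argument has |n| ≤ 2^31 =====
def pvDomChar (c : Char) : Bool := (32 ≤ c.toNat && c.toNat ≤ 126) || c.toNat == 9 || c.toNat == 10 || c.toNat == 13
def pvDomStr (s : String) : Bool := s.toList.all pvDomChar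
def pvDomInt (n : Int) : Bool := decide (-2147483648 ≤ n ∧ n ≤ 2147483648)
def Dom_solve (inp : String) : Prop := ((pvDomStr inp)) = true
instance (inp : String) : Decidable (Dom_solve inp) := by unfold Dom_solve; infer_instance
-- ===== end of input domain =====

-- B replaces A's union-fold and intersection-fold over per-person sets by one per-group
-- character counter: union size = counter size, everyone-count = entries equal to the group size (idiomatic).

-- ===== PORT A =====
-- Python's reduce(f, xs) on a nonempty list; the [] case is unreachable here
-- (str.split never returns an empty list), so it carries a harmless default.
def pyReduce1 (f : PySem.Set Char → PySem.Set Char → PySem.Set Char) :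
    List (PySem.Set Char) → PySem.Set Char
  | [] => PySem.Set.empty
  | h :: t => t.foldl f h

def solve (inp : String) : Int × Int :=
  let groups := (PySem.Chars.splitOn inp.toList ['\n', '\n']).map
    (fun g => PySem.Chars.splitOn (PySem.Chars.strip (PySem.Chars.lower g)) ['\n'])
  let anyAnswered := groups.map (fun group =>
    pyReduce1 (fun acc cur => PySem.Set.union acc cur)
      (group.map (fun person => PySem.Set.ofList person)))
  let everyoneAnswered := groups.map (fun group =>
    pyReduce1 (fun acc cur => PySem.Set.inter acc cur)
      (group.map (fun person => PySem.Set.ofList person)))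
  (anyAnswered.foldl (fun accSum curSet => accSum + PySem.Set.len curSet) 0,
   everyoneAnswered.foldl (fun accSum curSet => accSum + PySem.Set.len curSet) 0)

-- ===== PORT B =====
def solve_alt (inp : String) : Int × Int :=
  let groups := (PySem.Chars.splitOn inp.toList ['\n', '\n']).map
    (fun g => PySem.Chars.splitOn (PySem.Chars.strip (PySem.Chars.lower g)) ['\n'])
  groups.foldl (fun acc group =>
    let cnt := group.foldl (fun d person =>
        (PySem.List.dedup person).foldl (fun d c => d.insert c (d.getD c 0 + 1)) d)
      PySem.Dict.empty
    (acc.1 + (cnt.size : Int),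
     acc.2 + cnt.values.foldl
        (fun s v => if v == (group.length : Int) then s + 1 else s) 0))
    (0, 0)

-- ===== PRECONDITION & SPEC =====
def Spec_solve (inp : String) (out : Int × Int) : Prop := out = solve_alt inp
instance (inp : String) (out : Int × Int) : Decidable (Spec_solve inp out) := by unfold Spec_solve; infer_instance

-- ===== CLAIM (what is proved, stated in full; the proofs are below) =====
def Claim_equal_solve : Prop := ∀ (inp : String), Dom_solve inp → Spec_solve inp (solve inp)

-- ===== LEMMAS AND PROOFS =====

-- B's per-group counter (definitionally the inner fold of solve_alt)
def groupCnt (group : List (List Char)) : PySem.Dict Char Int :=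
  group.foldl (fun d person =>
    (PySem.List.dedup person).foldl (fun d c => d.insert c (d.getD c 0 + 1)) d)
    PySem.Dict.empty

lemma foldl_flat (group : List (List Char)) (d : PySem.Dict Char Int) :
    group.foldl (fun d person =>
      (PySem.List.dedup person).foldl (fun d c => d.insert c (d.getD c 0 + 1)) d) d
    = (group.flatMap PySem.List.dedup).foldl (fun d c => d.insert c (d.getD c 0 + 1)) d := by
  induction group generalizing d with
  | nil => rfl
  | cons p t ih => simp only [List.flatMap_cons, List.foldl_cons, List.foldl_append, ih]

lemma groupCnt_eq_counter (group : List (List Char)) :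
    groupCnt group = PySem.Dict.counter (group.flatMap PySem.List.dedup) := by
  rw [groupCnt, foldl_flat, PySem.Dict.foldl_insert_getD_add_one_eq_counter]
lemma mem_foldl_union (ls : List (PySem.Set Char)) (s : PySem.Set Char) (y : Char) :
    y ∈ ls.foldl (fun a c => PySem.Set.union a c) s ↔ y ∈ s ∨ ∃ t ∈ ls, y ∈ t := by
  induction ls generalizing s with
  | nil => simp
  | cons h t ih => simp [ih, PySem.Set.mem_union, or_assoc]

lemma nodup_foldl_union (ls : List (PySem.Set Char)) (s : PySem.Set Char) (hs : s.Nodup) :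
    (ls.foldl (fun a c => PySem.Set.union a c) s).Nodup := by
  induction ls generalizing s with
  | nil => exact hs
  | cons h t ih => exact ih _ (PySem.Set.nodup_union s h hs)

lemma groupAny (group : List (List Char)) :
    PySem.Set.len (pyReduce1 (fun a c => PySem.Set.union a c)
      (group.map (fun p => PySem.Set.ofList p))) = ((groupCnt group).size : Int) := by
  rw [groupCnt_eq_counter]
  cases group with
  | nil => decide
  | cons p0 rest =>
      have hsz : (PySem.Dict.counter ((p0 :: rest).flatMap PySem.List.dedup)).size
          = (PySem.Set.ofList ((p0 :: rest).flatMap PySem.List.dedup)).length := by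
        rw [← PySem.Dict.keys_counter]
        simp [PySem.Dict.size, PySem.Dict.keys]
      rw [hsz]
      simp only [pyReduce1, List.map_cons, PySem.Set.len]
      congr 1
      apply List.Perm.length_eq
      rw [List.perm_ext_iff_of_nodup
        (nodup_foldl_union _ _ (PySem.Set.nodup_ofList _)) (PySem.Set.nodup_ofList _)]
      intro a
      simp [mem_foldl_union, PySem.Set.mem_ofList, List.mem_flatMap]
lemma mem_foldl_inter (ls : List (PySem.Set Char)) (s : PySem.Set Char) (y : Char) :
    y ∈ ls.foldl (fun a c => PySem.Set.inter a c) s ↔ y ∈ s ∧ ∀ t ∈ ls, y ∈ t := by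
  induction ls generalizing s with
  | nil => simp
  | cons h t ih =>
      simp only [List.foldl_cons, ih, PySem.Set.mem_inter, List.mem_cons]
      constructor
      · rintro ⟨⟨h1, h2⟩, h3⟩
        exact ⟨h1, by rintro t (rfl | ht) <;> [exact h2; exact h3 _ ht]⟩
      · rintro ⟨h1, h2⟩
        exact ⟨⟨h1, h2 _ (Or.inl rfl)⟩, fun t ht => h2 _ (Or.inr ht)⟩

lemma nodup_foldl_inter (ls : List (PySem.Set Char)) (s : PySem.Set Char) (hs : s.Nodup) :
    (ls.foldl (fun a c => PySem.Set.inter a c) s).Nodup := by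
  induction ls generalizing s with
  | nil => exact hs
  | cons h t ih => exact ih _ (PySem.Set.nodup_inter s h hs)

lemma foldl_count_if (l : List Int) (n : Int) (s : Int) :
    l.foldl (fun s v => if v == n then s + 1 else s) s
      = s + ((l.filter (fun v => v == n)).length : Int) := by
  induction l generalizing s with
  | nil => simp
  | cons h t ih =>
      simp only [List.foldl_cons, ih, List.filter_cons]
      by_cases hv : h == n <;> simp [hv] <;> ring

lemma count_flat (group : List (List Char)) (k : Char) :
    (group.flatMap PySem.List.dedup).count k = group.countP (fun p => decide (k ∈ p)) := by
  induction group with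
  | nil => rfl
  | cons p t ih =>
      rw [List.flatMap_cons, List.count_append, ih, List.countP_cons]
      have hd : (PySem.List.dedup p).count k = if k ∈ p then 1 else 0 := by
        by_cases hk : k ∈ p
        · simp only [hk, if_true]
          exact List.count_eq_one_of_mem (by simpa using PySem.Set.nodup_ofList p)
            (by simpa [PySem.List.mem_dedup] using hk)
        · simp only [hk, if_false]
          exact List.count_eq_zero_of_not_mem (by simpa [PySem.List.mem_dedup] using hk)
      rw [hd]
      by_cases hk : k ∈ p <;> simp [hk, Nat.add_comm]

lemma groupEv (group : List (List Char)) :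
    PySem.Set.len (pyReduce1 (fun a c => PySem.Set.inter a c)
      (group.map (fun p => PySem.Set.ofList p))) =
    (groupCnt group).values.foldl
      (fun s v => if v == (group.length : Int) then s + 1 else s) 0 := by
  rw [groupCnt_eq_counter]
  cases group with
  | nil => decide
  | cons p0 rest =>
      have hvals : (PySem.Dict.counter ((p0 :: rest).flatMap PySem.List.dedup)).values
          = (PySem.Set.ofList ((p0 :: rest).flatMap PySem.List.dedup)).map
              (fun k => ((((p0 :: rest).flatMap PySem.List.dedup).count k : Nat) : Int)) := by
        simp [PySem.Dict.values, PySem.Dict.items_counter]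
      rw [hvals, foldl_count_if, List.filter_map]
      simp only [pyReduce1, List.map_cons, PySem.Set.len, List.length_map, zero_add]
      congr 1
      apply List.Perm.length_eq
      rw [List.perm_ext_iff_of_nodup
        (nodup_foldl_inter _ _ (PySem.Set.nodup_ofList _))
        (List.Nodup.filter _ (PySem.Set.nodup_ofList _))]
      intro a
      rw [mem_foldl_inter, List.mem_filter]
      constructor
      · rintro ⟨h0, hall⟩
        have hmem : ∀ p ∈ p0 :: rest, a ∈ p := by
          intro p hp
          rcases List.mem_cons.mp hp with rfl | hp
          · simpa [PySem.Set.mem_ofList] using h0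
          · simpa [PySem.Set.mem_ofList] using hall _ (List.mem_map_of_mem hp)
        have hcnt : ((p0 :: rest).flatMap PySem.List.dedup).count a = (p0 :: rest).length := by
          rw [count_flat]
          exact List.countP_eq_length.mpr (fun p hp => by simpa using hmem p hp)
        refine ⟨?_, ?_⟩
        · simp only [PySem.Set.mem_ofList]
          exact List.mem_flatMap.mpr ⟨p0, List.mem_cons_self,
            by simpa [PySem.List.mem_dedup] using hmem p0 List.mem_cons_self⟩
        · simp only [Function.comp_apply, beq_iff_eq]
          exact_mod_cast hcnt
      · rintro ⟨hmem, hcnt⟩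
        have hcnt' : ((p0 :: rest).flatMap PySem.List.dedup).count a = (p0 :: rest).length := by
          have h := hcnt
          simp only [Function.comp_apply, beq_iff_eq] at h
          exact_mod_cast h
        have hall : ∀ p ∈ p0 :: rest, a ∈ p := by
          have h := List.countP_eq_length.mp (by rw [← count_flat]; exact hcnt')
          intro p hp; simpa using h p hp
        refine ⟨by simpa [PySem.Set.mem_ofList] using hall p0 List.mem_cons_self, ?_⟩
        intro t ht
        rcases List.mem_map.mp ht with ⟨p, hp, rfl⟩
        simpa [PySem.Set.mem_ofList] using hall p (List.mem_cons_of_mem _ hp)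
lemma assemble (gs : List (List (List Char))) (a b : Int) :
    gs.foldl (fun acc group =>
      let cnt := group.foldl (fun d person =>
          (PySem.List.dedup person).foldl (fun d c => d.insert c (d.getD c 0 + 1)) d)
        PySem.Dict.empty
      (acc.1 + (cnt.size : Int),
       acc.2 + cnt.values.foldl
          (fun s v => if v == (group.length : Int) then s + 1 else s) 0)) (a, b)
    = (gs.foldl (fun s g => s + PySem.Set.len (pyReduce1 (fun x y => PySem.Set.union x y)
          (g.map (fun p => PySem.Set.ofList p)))) a,
       gs.foldl (fun s g => s + PySem.Set.len (pyReduce1 (fun x y => PySem.Set.inter x y)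
          (g.map (fun p => PySem.Set.ofList p)))) b) := by
  induction gs generalizing a b with
  | nil => rfl
  | cons g t ih =>
      simp only [List.foldl_cons]
      rw [ih, groupAny g, groupEv g]
      rfl

-- ===== VERDICT (by name: the statement is the Claim_ definition above) =====
theorem solve_spec : Claim_equal_solve := by
  intro inp _
  unfold Spec_solve solve solve_alt
  rw [assemble]
  simp only [List.foldl_map]
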